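-- pv_equiv track=rewrite | github.com/martijnvermaat/interval-binning | binning/__init__.py | range_per_level
-- ===== SOURCE A (Python) =====
-- BIN_OFFSETS = [512 + 64 + 8 + 1, 64 + 8 + 1, 8 + 1, 1, 0]
--
-- SHIFT_FIRST = 17
--
-- SHIFT_NEXT = 3
--
-- MAX_POSITION = pow(2, 29) - 1
--
-- class OutOfRangeError(Exception):
--     """
--     Exception that is raised on seeing an invalid bin number or a position or
--     interval exceeding the range of the binning scheme.
--     """
--     pass
--
-- def range_per_level(start, stop):
--     """
--     Given an interval `start:stop`, make an iterator that returns for each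
--     level the first and last bin overlapping the interval, starting with the
--     smallest bins.
--
--     Zero-length intervals are binned according to the one-position interval
--     following it.
--
--     Algorithm by `Jim Kent
--     <http://genomewiki.ucsc.edu/index.php/Bin_indexing_system>`_.
--
--     :arg int start, stop: Interval positions (zero-based, open-ended).
--
--     :return: Iterator yielding tuples `first, last` being the first and last
--       bin overlapping with `start:stop`. The tuples are ordered according to
--       the bin size of the levels, starting with the smallest bins.
--     :rtype: iterator(tuple(int, int))
--
--     :raise OutOfRangeError: If `start:stop` exceeds the range of the binning
--       scheme.
--     """
--     if start < 0 or stop > MAX_POSITION + 1: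
--         raise OutOfRangeError(
--             'Interval %d:%d is out of range (maximum position is %d)'
--             % (start, stop, MAX_POSITION))
--
--     # Note that we treat the zero-length interval `x:x` as `x:x+1`.
--     start_bin = start
--     stop_bin = max(start, stop - 1)
--
--     start_bin >>= SHIFT_FIRST
--     stop_bin >>= SHIFT_FIRST
--
--     for offset in BIN_OFFSETS:
--         yield offset + start_bin, offset + stop_bin
--         start_bin >>= SHIFT_NEXT
--         stop_bin >>= SHIFT_NEXT
-- ===== SOURCE B (Python) =====
-- SHIFT_FIRST = 17
-- SHIFT_NEXT = 3
-- MAX_POSITION = pow(2, 29) - 1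
-- NUM_LEVELS = 5
--
--
-- class OutOfRangeError(Exception):
--     pass
--
--
-- def _levels(a, b, offset, shift, n):
--     # Build the list back-to-front: recurse towards the finer levels
--     # (offset -> offset*8 + 1, shift -> shift - SHIFT_NEXT) and append the
--     # current (coarser) level's pair after the recursive result.
--     if n == 0:
--         return []
--     return _levels(a, b, offset * 8 + 1, shift - SHIFT_NEXT, n - 1) \
--         + [(offset + (a >> shift), offset + (b >> shift))]
--
--
-- def range_per_level(start, stop):
--     if start < 0 or stop > MAX_POSITION + 1:
--         raise OutOfRangeError(
--             'Interval %d:%d is out of range (maximum position is %d)'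
--             % (start, stop, MAX_POSITION))
--     yield from _levels(start, max(start, stop - 1),
--                        0, SHIFT_FIRST + (NUM_LEVELS - 1) * SHIFT_NEXT,
--                        NUM_LEVELS)
-- ===== Notes on version B (the rewrite author's own statement) =====
-- stated objective: alternative
-- what changed: Dropped the BIN_OFFSETS table and the threaded >>= accumulators: B builds the level list back-to-front by recursion from the coarsest level, generating each finer level's offset arithmetically (offset*8+1) and shift (shift-3), then appends the coarser pair after the recursive result.
import Mathlib
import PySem

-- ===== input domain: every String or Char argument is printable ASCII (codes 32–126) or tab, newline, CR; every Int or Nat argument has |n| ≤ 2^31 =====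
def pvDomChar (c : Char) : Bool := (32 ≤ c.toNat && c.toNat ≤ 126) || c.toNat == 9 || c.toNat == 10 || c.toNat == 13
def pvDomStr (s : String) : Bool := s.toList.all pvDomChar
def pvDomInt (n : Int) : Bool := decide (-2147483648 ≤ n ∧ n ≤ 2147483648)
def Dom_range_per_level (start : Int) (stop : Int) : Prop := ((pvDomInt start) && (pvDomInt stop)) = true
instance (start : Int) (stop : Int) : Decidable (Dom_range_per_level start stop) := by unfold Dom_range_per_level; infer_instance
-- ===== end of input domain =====

-- B replaces A's BIN_OFFSETS table walk with threaded >>= accumulators by a recursive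
-- back-to-front construction from the coarsest level, generating offsets arithmetically
-- (offset*8+1) and shifts (shift-3) (objective: alternative).

-- module constants
def BIN_OFFSETS : List Int := [512 + 64 + 8 + 1, 64 + 8 + 1, 8 + 1, 1, 0]
def SHIFT_FIRST : Nat := 17
def SHIFT_NEXT : Nat := 3
def MAX_POSITION : Int := 2 ^ 29 - 1
def NUM_LEVELS : Nat := 5

-- ===== PORT A =====
-- the `for offset in BIN_OFFSETS` loop threading the two running bins
-- (Python's `>>` on Int is Lean's `>>>` with a Nat shift — exact, also on negatives)
def rplLoopA : List Int → Int → Int → List (Int × Int)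
  | [], _, _ => []
  | o :: os, startBin, stopBin =>
      (o + startBin, o + stopBin) :: rplLoopA os (startBin >>> SHIFT_NEXT) (stopBin >>> SHIFT_NEXT)

-- (Pre_ excludes the inputs on which the Python raises OutOfRangeError)
def range_per_level (start : Int) (stop : Int) : List (Int × Int) :=
  let start_bin := start
  let stop_bin := max start (stop - 1)
  let start_bin := start_bin >>> SHIFT_FIRST
  let stop_bin := stop_bin >>> SHIFT_FIRST
  rplLoopA BIN_OFFSETS start_bin stop_bin

-- ===== PORT B =====
-- recursion towards the finer levels; the coarser pair is appended after the recursive result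
def rplLevelsB (a b offset : Int) (shift : Nat) : Nat → List (Int × Int)
  | 0 => []
  | n + 1 =>
      rplLevelsB a b (offset * 8 + 1) (shift - SHIFT_NEXT) n
        ++ [(offset + (a >>> shift), offset + (b >>> shift))]

def range_per_level_alt (start : Int) (stop : Int) : List (Int × Int) :=
  rplLevelsB start (max start (stop - 1)) 0 (SHIFT_FIRST + (NUM_LEVELS - 1) * SHIFT_NEXT) NUM_LEVELS

-- ===== PRECONDITION & SPEC =====
-- exactly the inputs on which Python A returns normally (otherwise it raises OutOfRangeError)
def Pre_range_per_level (start : Int) (stop : Int) : Prop :=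
  0 ≤ start ∧ stop ≤ MAX_POSITION + 1
instance (start : Int) (stop : Int) : Decidable (Pre_range_per_level start stop) := by
  unfold Pre_range_per_level; infer_instance

def pvWitness_range_per_level : Int × Int := (100000, 300000)

def Spec_range_per_level (start : Int) (stop : Int) (out : List (Int × Int)) : Prop := out = range_per_level_alt start stop
instance (start : Int) (stop : Int) (out : List (Int × Int)) : Decidable (Spec_range_per_level start stop out) := by unfold Spec_range_per_level; infer_instance

-- ===== CLAIM (what is proved, stated in full; the proofs are below) =====
def Claim_equal_range_per_level : Prop := ∀ (start : Int) (stop : Int), Dom_range_per_level start stop → Pre_range_per_level start stop → Spec_range_per_level start stop (range_per_level start stop)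

-- ===== LEMMAS AND PROOFS =====

theorem shiftR_shiftR (x : Int) (a b : Nat) : (x >>> a) >>> b = x >>> (a + b) := by
  rw [← Int.shiftRight_add]

-- ===== VERDICT (by name: the statement is the Claim_ definition above) =====
theorem range_per_level_spec : Claim_equal_range_per_level := by
  intro start stop _ _
  unfold Spec_range_per_level range_per_level range_per_level_alt
  simp only [BIN_OFFSETS, NUM_LEVELS, SHIFT_FIRST, SHIFT_NEXT, rplLoopA, rplLevelsB,
    shiftR_shiftR, List.nil_append, List.cons_append]
  norm_num
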